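-- pv_equiv track=rewrite | github.com/afloresep/fused_target_tmap | fused_mapc/fused_tmap.py | map_target_organism
-- ===== SOURCE A (Python) =====
-- def map_target_organism(value):
--     """Map target organism to a simplified category."""
--     if 'sapiens' in value:
--         return 'Homo sapiens'
--     elif 'virus' in value:
--         return 'Virus'
--     elif any(organism in value for organism in ['rattus', 'Musculus']):
--         return 'Rat'
--     elif 'taurus' in value:
--         return 'Bovid'
--     elif any(organism in value for organism in ['scrofa', 'Macaca', 'porcellus', 'oryctolagus', 'canis', 'Cricetulus']):
--         return 'Other mammals'
--     elif any(bacteria in value for bacteria in ['Mycobacterium', 'Escherichia', 'Salmonella', 'Staphylococcus', 'Pseudomonas', 'Bacillus', 'Acinetobacter']):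
--         return 'Bacteria'
--     elif any(parasite in value for parasite in ['Plasmodium', 'Trypanosoma', 'Schistosoma', 'Leishmania']):
--         return 'Parasites'
--     else:
--         return 'Others'
-- ===== SOURCE B (Python) =====
-- KEYWORD_MAP = {
--     'sapiens': (0, 'Homo sapiens'),
--     'virus': (1, 'Virus'),
--     'rattus': (2, 'Rat'), 'Musculus': (2, 'Rat'),
--     'taurus': (3, 'Bovid'),
--     'scrofa': (4, 'Other mammals'), 'Macaca': (4, 'Other mammals'),
--     'porcellus': (4, 'Other mammals'), 'oryctolagus': (4, 'Other mammals'),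
--     'canis': (4, 'Other mammals'), 'Cricetulus': (4, 'Other mammals'),
--     'Mycobacterium': (5, 'Bacteria'), 'Escherichia': (5, 'Bacteria'),
--     'Salmonella': (5, 'Bacteria'), 'Staphylococcus': (5, 'Bacteria'),
--     'Pseudomonas': (5, 'Bacteria'), 'Bacillus': (5, 'Bacteria'),
--     'Acinetobacter': (5, 'Bacteria'),
--     'Plasmodium': (6, 'Parasites'), 'Trypanosoma': (6, 'Parasites'),
--     'Schistosoma': (6, 'Parasites'), 'Leishmania': (6, 'Parasites'),
-- }
--
-- def map_target_organism(value):
--     """Map target organism to a simplified category."""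
--     best = None
--     for kw, (prio, cat) in KEYWORD_MAP.items():
--         if kw in value and (best is None or prio < best[0]):
--             best = (prio, cat)
--     return best[1] if best is not None else 'Others'
-- ===== Notes on version B (the rewrite author's own statement) =====
-- stated objective: alternative
-- what changed: B flattens the grouped if/elif chain into a single keyword->(priority,category) map and does one full non-short-circuiting scan keeping the minimum-priority matching keyword, instead of A's ordered chain of group membership tests.
import Mathlib
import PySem

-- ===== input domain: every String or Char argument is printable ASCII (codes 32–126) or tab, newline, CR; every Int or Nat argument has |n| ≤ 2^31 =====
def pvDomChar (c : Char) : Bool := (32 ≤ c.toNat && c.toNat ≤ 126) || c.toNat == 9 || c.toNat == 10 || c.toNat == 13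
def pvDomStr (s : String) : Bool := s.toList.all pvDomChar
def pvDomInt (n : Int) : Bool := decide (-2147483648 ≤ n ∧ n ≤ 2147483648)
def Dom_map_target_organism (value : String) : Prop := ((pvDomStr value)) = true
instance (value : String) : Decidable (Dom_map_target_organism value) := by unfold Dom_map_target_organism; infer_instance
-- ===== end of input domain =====

-- B replaces A's short-circuiting if/elif chain of grouped membership tests by one full
-- scan of a flat keyword -> (priority, category) map keeping the minimum-priority match
-- (objective: alternative). Same result on every input.

-- ===== PORT A =====
def map_target_organism (value : String) : String :=
  if PySem.Str.isIn "sapiens" value then "Homo sapiens"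
  else if PySem.Str.isIn "virus" value then "Virus"
  else if (["rattus", "Musculus"].any (fun organism => PySem.Str.isIn organism value)) then "Rat"
  else if PySem.Str.isIn "taurus" value then "Bovid"
  else if (["scrofa", "Macaca", "porcellus", "oryctolagus", "canis", "Cricetulus"].any
      (fun organism => PySem.Str.isIn organism value)) then "Other mammals"
  else if (["Mycobacterium", "Escherichia", "Salmonella", "Staphylococcus", "Pseudomonas",
      "Bacillus", "Acinetobacter"].any (fun bacteria => PySem.Str.isIn bacteria value)) then "Bacteria"
  else if (["Plasmodium", "Trypanosoma", "Schistosoma", "Leishmania"].any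
      (fun parasite => PySem.Str.isIn parasite value)) then "Parasites"
  else "Others"

-- ===== PORT B =====
-- KEYWORD_MAP of Source B: keyword -> (priority, category), in insertion order
def pvKeywordMap : List (String × Nat × String) :=
  [ ("sapiens", 0, "Homo sapiens"),
    ("virus", 1, "Virus"),
    ("rattus", 2, "Rat"), ("Musculus", 2, "Rat"),
    ("taurus", 3, "Bovid"),
    ("scrofa", 4, "Other mammals"), ("Macaca", 4, "Other mammals"),
    ("porcellus", 4, "Other mammals"), ("oryctolagus", 4, "Other mammals"),
    ("canis", 4, "Other mammals"), ("Cricetulus", 4, "Other mammals"),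
    ("Mycobacterium", 5, "Bacteria"), ("Escherichia", 5, "Bacteria"),
    ("Salmonella", 5, "Bacteria"), ("Staphylococcus", 5, "Bacteria"),
    ("Pseudomonas", 5, "Bacteria"), ("Bacillus", 5, "Bacteria"),
    ("Acinetobacter", 5, "Bacteria"),
    ("Plasmodium", 6, "Parasites"), ("Trypanosoma", 6, "Parasites"),
    ("Schistosoma", 6, "Parasites"), ("Leishmania", 6, "Parasites") ]

-- loop body: if kw in value and (best is None or prio < best[0]): best = (prio, cat)
def pvStep (value : String) (best : Option (Nat × String)) (kv : String × Nat × String) :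
    Option (Nat × String) :=
  if PySem.Str.isIn kv.1 value ∧ (best.isNone = true ∨ kv.2.1 < (best.getD (0, "")).1) then
    some kv.2
  else best

def map_target_organism_alt (value : String) : String :=
  match pvKeywordMap.foldl (pvStep value) none with
  | some (_, cat) => cat
  | none => "Others"

-- ===== PRECONDITION & SPEC =====
def Spec_map_target_organism (value : String) (out : String) : Prop := out = map_target_organism_alt value
instance (value : String) (out : String) : Decidable (Spec_map_target_organism value out) := by unfold Spec_map_target_organism; infer_instance

-- ===== CLAIM (what is proved, stated in full; the proofs are below) =====
def Claim_equal_map_target_organism : Prop := ∀ (value : String), Dom_map_target_organism value → Spec_map_target_organism value (map_target_organism value)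

-- ===== LEMMAS AND PROOFS =====

-- once best is set to priority q, keywords of priority ≥ q never overwrite it
theorem pvStep_keep (value : String) (q : Nat) (c : String) (kv : String × Nat × String)
    (h : q ≤ kv.2.1) : pvStep value (some (q, c)) kv = some (q, c) := by
  simp [pvStep]
  omega

theorem pvFoldl_keep (value : String) (l : List (String × Nat × String)) (q : Nat) (c : String)
    (h : ∀ e ∈ l, q ≤ e.2.1) :
    l.foldl (pvStep value) (some (q, c)) = some (q, c) := by
  induction l with
  | nil => rfl
  | cons e l ih =>
      rw [List.foldl_cons, pvStep_keep value q c e (h e (by simp))]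
      exact ih (fun e he => h e (by simp [he]))

-- over a priority-nondecreasing list, the fold keeps the FIRST matching keyword
theorem pvFoldl_first (value : String) (l : List (String × Nat × String))
    (hmono : l.Pairwise (fun a b => a.2.1 ≤ b.2.1)) :
    l.foldl (pvStep value) none = (l.find? (fun e => PySem.Str.isIn e.1 value)).map (·.2) := by
  induction l with
  | nil => rfl
  | cons e l ih =>
      obtain ⟨k, p, c⟩ := e
      rw [List.pairwise_cons] at hmono
      by_cases h : PySem.Str.isIn k value = true
      · rw [List.foldl_cons, List.find?_cons, h]
        have hstep : pvStep value none (k, p, c) = some (p, c) := by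
          simp [PySem.Str.isIn] at h
          simp [pvStep, h]
        rw [hstep, pvFoldl_keep value l p c (fun x hx => hmono.1 x hx)]
        rfl
      · rw [List.foldl_cons, List.find?_cons, Bool.eq_false_iff.2 h]
        have hstep : pvStep value none (k, p, c) = none := by
          simp [PySem.Str.isIn] at h
          simp [pvStep, h]
        rw [hstep]
        exact ih hmono.2

-- ===== VERDICT (by name: the statement is the Claim_ definition above) =====
theorem map_target_organism_spec : Claim_equal_map_target_organism := by
  intro value _
  unfold Spec_map_target_organism
  rw [map_target_organism_alt, pvFoldl_first value pvKeywordMap (by decide)]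
  cases h1 : PySem.Chars.isIn ['s', 'a', 'p', 'i', 'e', 'n', 's'] value.toList
  · -- keyword absent, continue
    cases h2 : PySem.Chars.isIn ['v', 'i', 'r', 'u', 's'] value.toList
    · -- keyword absent, continue
      cases h3 : PySem.Chars.isIn ['r', 'a', 't', 't', 'u', 's'] value.toList
      · -- keyword absent, continue
        cases h4 : PySem.Chars.isIn ['M', 'u', 's', 'c', 'u', 'l', 'u', 's'] value.toList
        · -- keyword absent, continue
          cases h5 : PySem.Chars.isIn ['t', 'a', 'u', 'r', 'u', 's'] value.toList
          · -- keyword absent, continue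
            cases h6 : PySem.Chars.isIn ['s', 'c', 'r', 'o', 'f', 'a'] value.toList
            · -- keyword absent, continue
              cases h7 : PySem.Chars.isIn ['M', 'a', 'c', 'a', 'c', 'a'] value.toList
              · -- keyword absent, continue
                cases h8 : PySem.Chars.isIn ['p', 'o', 'r', 'c', 'e', 'l', 'l', 'u', 's'] value.toList
                · -- keyword absent, continue
                  cases h9 : PySem.Chars.isIn ['o', 'r', 'y', 'c', 't', 'o', 'l', 'a', 'g', 'u', 's'] value.toList
                  · -- keyword absent, continue
                    cases h10 : PySem.Chars.isIn ['c', 'a', 'n', 'i', 's'] value.toList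
                    · -- keyword absent, continue
                      cases h11 : PySem.Chars.isIn ['C', 'r', 'i', 'c', 'e', 't', 'u', 'l', 'u', 's'] value.toList
                      · -- keyword absent, continue
                        cases h12 : PySem.Chars.isIn ['M', 'y', 'c', 'o', 'b', 'a', 'c', 't', 'e', 'r', 'i', 'u', 'm'] value.toList
                        · -- keyword absent, continue
                          cases h13 : PySem.Chars.isIn ['E', 's', 'c', 'h', 'e', 'r', 'i', 'c', 'h', 'i', 'a'] value.toList
                          · -- keyword absent, continue
                            cases h14 : PySem.Chars.isIn ['S', 'a', 'l', 'm', 'o', 'n', 'e', 'l', 'l', 'a'] value.toList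
                            · -- keyword absent, continue
                              cases h15 : PySem.Chars.isIn ['S', 't', 'a', 'p', 'h', 'y', 'l', 'o', 'c', 'o', 'c', 'c', 'u', 's'] value.toList
                              · -- keyword absent, continue
                                cases h16 : PySem.Chars.isIn ['P', 's', 'e', 'u', 'd', 'o', 'm', 'o', 'n', 'a', 's'] value.toList
                                · -- keyword absent, continue
                                  cases h17 : PySem.Chars.isIn ['B', 'a', 'c', 'i', 'l', 'l', 'u', 's'] value.toList
                                  · -- keyword absent, continue
                                    cases h18 : PySem.Chars.isIn ['A', 'c', 'i', 'n', 'e', 't', 'o', 'b', 'a', 'c', 't', 'e', 'r'] value.toList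
                                    · -- keyword absent, continue
                                      cases h19 : PySem.Chars.isIn ['P', 'l', 'a', 's', 'm', 'o', 'd', 'i', 'u', 'm'] value.toList
                                      · -- keyword absent, continue
                                        cases h20 : PySem.Chars.isIn ['T', 'r', 'y', 'p', 'a', 'n', 'o', 's', 'o', 'm', 'a'] value.toList
                                        · -- keyword absent, continue
                                          cases h21 : PySem.Chars.isIn ['S', 'c', 'h', 'i', 's', 't', 'o', 's', 'o', 'm', 'a'] value.toList
                                          · -- keyword absent, continue
                                            cases h22 : PySem.Chars.isIn ['L', 'e', 'i', 's', 'h', 'm', 'a', 'n', 'i', 'a'] value.toList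
                                            · simp [map_target_organism, pvKeywordMap, List.find?_cons, List.find?_nil, PySem.Str.isIn, h1, h2, h3, h4, h5, h6, h7, h8, h9, h10, h11, h12, h13, h14, h15, h16, h17, h18, h19, h20, h21, h22]
                                            · simp [map_target_organism, pvKeywordMap, List.find?_cons, List.find?_nil, PySem.Str.isIn, h1, h2, h3, h4, h5, h6, h7, h8, h9, h10, h11, h12, h13, h14, h15, h16, h17, h18, h19, h20, h21, h22]
                                          · simp [map_target_organism, pvKeywordMap, List.find?_cons, List.find?_nil, PySem.Str.isIn, h1, h2, h3, h4, h5, h6, h7, h8, h9, h10, h11, h12, h13, h14, h15, h16, h17, h18, h19, h20, h21]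
                                        · simp [map_target_organism, pvKeywordMap, List.find?_cons, List.find?_nil, PySem.Str.isIn, h1, h2, h3, h4, h5, h6, h7, h8, h9, h10, h11, h12, h13, h14, h15, h16, h17, h18, h19, h20]
                                      · simp [map_target_organism, pvKeywordMap, List.find?_cons, List.find?_nil, PySem.Str.isIn, h1, h2, h3, h4, h5, h6, h7, h8, h9, h10, h11, h12, h13, h14, h15, h16, h17, h18, h19]
                                    · simp [map_target_organism, pvKeywordMap, List.find?_cons, List.find?_nil, PySem.Str.isIn, h1, h2, h3, h4, h5, h6, h7, h8, h9, h10, h11, h12, h13, h14, h15, h16, h17, h18]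
                                  · simp [map_target_organism, pvKeywordMap, List.find?_cons, List.find?_nil, PySem.Str.isIn, h1, h2, h3, h4, h5, h6, h7, h8, h9, h10, h11, h12, h13, h14, h15, h16, h17]
                                · simp [map_target_organism, pvKeywordMap, List.find?_cons, List.find?_nil, PySem.Str.isIn, h1, h2, h3, h4, h5, h6, h7, h8, h9, h10, h11, h12, h13, h14, h15, h16]
                              · simp [map_target_organism, pvKeywordMap, List.find?_cons, List.find?_nil, PySem.Str.isIn, h1, h2, h3, h4, h5, h6, h7, h8, h9, h10, h11, h12, h13, h14, h15]
                            · simp [map_target_organism, pvKeywordMap, List.find?_cons, List.find?_nil, PySem.Str.isIn, h1, h2, h3, h4, h5, h6, h7, h8, h9, h10, h11, h12, h13, h14]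
                          · simp [map_target_organism, pvKeywordMap, List.find?_cons, List.find?_nil, PySem.Str.isIn, h1, h2, h3, h4, h5, h6, h7, h8, h9, h10, h11, h12, h13]
                        · simp [map_target_organism, pvKeywordMap, List.find?_cons, List.find?_nil, PySem.Str.isIn, h1, h2, h3, h4, h5, h6, h7, h8, h9, h10, h11, h12]
                      · simp [map_target_organism, pvKeywordMap, List.find?_cons, List.find?_nil, PySem.Str.isIn, h1, h2, h3, h4, h5, h6, h7, h8, h9, h10, h11]
                    · simp [map_target_organism, pvKeywordMap, List.find?_cons, List.find?_nil, PySem.Str.isIn, h1, h2, h3, h4, h5, h6, h7, h8, h9, h10]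
                  · simp [map_target_organism, pvKeywordMap, List.find?_cons, List.find?_nil, PySem.Str.isIn, h1, h2, h3, h4, h5, h6, h7, h8, h9]
                · simp [map_target_organism, pvKeywordMap, List.find?_cons, List.find?_nil, PySem.Str.isIn, h1, h2, h3, h4, h5, h6, h7, h8]
              · simp [map_target_organism, pvKeywordMap, List.find?_cons, List.find?_nil, PySem.Str.isIn, h1, h2, h3, h4, h5, h6, h7]
            · simp [map_target_organism, pvKeywordMap, List.find?_cons, List.find?_nil, PySem.Str.isIn, h1, h2, h3, h4, h5, h6]
          · simp [map_target_organism, pvKeywordMap, List.find?_cons, List.find?_nil, PySem.Str.isIn, h1, h2, h3, h4, h5]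
        · simp [map_target_organism, pvKeywordMap, List.find?_cons, List.find?_nil, PySem.Str.isIn, h1, h2, h3, h4]
      · simp [map_target_organism, pvKeywordMap, List.find?_cons, List.find?_nil, PySem.Str.isIn, h1, h2, h3]
    · simp [map_target_organism, pvKeywordMap, List.find?_cons, List.find?_nil, PySem.Str.isIn, h1, h2]
  · simp [map_target_organism, pvKeywordMap, List.find?_cons, List.find?_nil, PySem.Str.isIn, h1]
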